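-- pv_equiv track=rewrite | github.com/mgoninen16/ALP | Assignments/Cryptography/CrypExercise.py | question23
-- ===== SOURCE A (Python) =====
-- def question23(s):
--   result = ""
--   for i in range(len(s)):
--     if (i - 2) % 3 == 0:
--       result += "!"
--     else:
--       result += s[i]
--   return result
-- ===== SOURCE B (Python) =====
-- def question23(s):
--   lst = list(s)
--   lst[2::3] = '!' * len(lst[2::3])
--   return ''.join(lst)
-- ===== Notes on version B (the rewrite author's own statement) =====
-- stated objective: idiomatic
-- what changed: Replaces the per-index loop with a branch (and quadratic string concatenation) by a list conversion, one strided slice assignment of the replacement characters, and a single join.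
import Mathlib
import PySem

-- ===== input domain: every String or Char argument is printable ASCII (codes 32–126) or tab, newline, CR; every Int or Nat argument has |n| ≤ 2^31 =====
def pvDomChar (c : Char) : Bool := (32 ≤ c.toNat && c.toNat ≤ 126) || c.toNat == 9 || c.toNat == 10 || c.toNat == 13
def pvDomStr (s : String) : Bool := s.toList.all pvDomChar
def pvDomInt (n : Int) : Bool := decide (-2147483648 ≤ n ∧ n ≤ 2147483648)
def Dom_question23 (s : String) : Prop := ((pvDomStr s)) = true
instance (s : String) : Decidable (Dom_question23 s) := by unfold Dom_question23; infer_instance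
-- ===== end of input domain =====

-- B replaces A's per-index loop-with-branch by a strided slice assignment over a char list (idiomatic).

-- ===== PORT A =====
-- for i in range(len(s)): result += "!" if (i-2)%3==0 else s[i]
def question23 (s : String) : String :=
  (PySem.List.pyRange 0 (PySem.Str.len s) 1).foldl
    (fun result i =>
      if PySem.Int.mod (i - 2) 3 = 0 then result ++ "!"
      else result.push ((PySem.Str.pyGet? s i).getD ' '))  -- i always in range, so getD is never taken
    ""

-- ===== PORT B =====
-- lst[2::3] = '!'*count : overwrite every third slot, walking the list in stride-3 chunks
def q23Stride : List Char → List Char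
  | a :: b :: _ :: rest => a :: b :: '!' :: q23Stride rest
  | xs => xs

def question23_alt (s : String) : String :=
  String.ofList (q23Stride s.toList)

-- ===== PRECONDITION & SPEC =====
def Spec_question23 (s : String) (out : String) : Prop := out = question23_alt s
instance (s : String) (out : String) : Decidable (Spec_question23 s out) := by unfold Spec_question23; infer_instance

-- ===== CLAIM (what is proved, stated in full; the proofs are below) =====
def Claim_equal_question23 : Prop := ∀ (s : String), Dom_question23 s → Spec_question23 s (question23 s)

-- ===== LEMMAS AND PROOFS =====

theorem q23Stride_length (l : List Char) : (q23Stride l).length = l.length := by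
  induction l using q23Stride.induct with
  | case1 a b c rest ih => simp [q23Stride, ih]
  | case2 xs h =>
    rw [q23Stride.eq_def]
    split
    case h_1 a b c rest => exact absurd rfl (h a b c rest)
    case h_2 => rfl

theorem q23Stride_getElem (l : List Char) (k : Nat) (hk : k < l.length)
    (hk' : k < (q23Stride l).length) :
    (q23Stride l)[k] = if k % 3 = 2 then '!' else l[k] := by
  induction l using q23Stride.induct generalizing k with
  | case1 a b c rest ih =>
    simp only [q23Stride] at hk' ⊢
    match k, hk with
    | 0, _ => rfl
    | 1, _ => rfl
    | 2, _ => rfl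
    | (m+3), h =>
      have hm : m < rest.length := by simpa using h
      have hm' : m < (q23Stride rest).length := by rw [q23Stride_length]; exact hm
      simp only [List.getElem_cons_succ]
      rw [ih m hm hm']
      have h3 : (m + 3) % 3 = m % 3 := by omega
      simp [h3]
  | case2 xs h =>
    -- xs has length ≤ 2 (no three-element prefix), q23Stride is the identity, and k % 3 ≠ 2
    match xs, h, k, hk with
    | [], _, k, hk => simp at hk
    | [a], _, 0, _ => rfl
    | [a, b], _, 0, _ => rfl
    | [a, b], _, 1, _ => rfl
    | a :: b :: c :: rest, h, _, _ => exact absurd rfl (h a b c rest)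

-- A's fold over strings, read through toList
theorem fold_toList (l : List Int) (s : String) (acc : String) :
    (l.foldl (fun result i =>
        if PySem.Int.mod (i - 2) 3 = 0 then result ++ "!"
        else result.push ((PySem.Str.pyGet? s i).getD ' ')) acc).toList
    = l.foldl (fun r i =>
        r ++ [if PySem.Int.mod (i - 2) 3 = 0 then '!'
              else ((PySem.List.pyGet? s.toList i).getD ' ')]) acc.toList := by
  induction l generalizing acc with
  | nil => rfl
  | cons x t ih =>
    simp only [List.foldl_cons]
    rw [ih]
    split <;> simp

theorem question23_toList (s : String) :
    (question23 s).toList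
      = (PySem.List.pyRange 0 (s.toList.length : Int) 1).map
          (fun i => if PySem.Int.mod (i - 2) 3 = 0 then '!'
                    else ((PySem.List.pyGet? s.toList i).getD ' ')) := by
  unfold question23
  rw [fold_toList, PySem.List.foldl_append_singleton_eq_map]
  simp

theorem mod_cond (k : Nat) :
    (PySem.Int.mod ((k : Int) - 2) 3 = 0) ↔ (k % 3 = 2) := by
  rw [PySem.Int.mod_eq_emod_of_pos (by norm_num : (0:Int) < 3)]
  omega

-- ===== VERDICT (by name: the statement is the Claim_ definition above) =====
theorem question23_spec : Claim_equal_question23 := by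
  intro s _
  unfold Spec_question23 question23_alt
  have hlist : (question23 s).toList = q23Stride s.toList := by
    rw [question23_toList s]
    apply List.ext_getElem
    · rw [q23Stride_length]; simp [PySem.List.length_pyRange_one]
    · intro k hk1 hk2
      have hk : k < s.toList.length := by
        simpa [PySem.List.length_pyRange_one] using hk1
      have hk3 : k < (PySem.List.pyRange 0 (s.toList.length : Int) 1).length := by
        simpa [PySem.List.length_pyRange_one] using hk
      rw [List.getElem_map, PySem.List.getElem_pyRange_one,
          q23Stride_getElem s.toList k hk hk2]
      rw [zero_add]
      by_cases h : k % 3 = 2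
      · rw [if_pos ((mod_cond k).mpr h), if_pos h]
      · rw [if_neg (fun hc => h ((mod_cond k).mp hc)), if_neg h]
        simp [PySem.List.pyGet?_natCast, List.getElem?_eq_getElem hk]
  calc question23 s = String.ofList (question23 s).toList := String.ofList_toList.symm
    _ = String.ofList (q23Stride s.toList) := by rw [hlist]
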